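-- pv_equiv track=rewrite | github.com/madjaqk/discord_bot | bot.py | is_supervocalic
-- ===== SOURCE A (Python) =====
-- def is_supervocalic(text):
--     vowels = {v: False for v in ("a", "e", "i", "o", "u")}
--     for char in text:
--         if char in vowels:
--             if vowels[char]:
--                 return False
--             else:
--                 vowels[char] = True
--
--     return all(vowels.values())
-- ===== SOURCE B (Python) =====
-- def is_supervocalic(text):
--     return all(text.count(v) == 1 for v in "aeiou")
-- ===== Notes on version B (the rewrite author's own statement) =====
-- stated objective: idiomatic
-- what changed: Replaces A's stateful seen-flags dict with early exit by a stateless count-then-check: for each of the five vowels, test text.count(v) == 1 via str.count; no mutable state, no early return.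
import Mathlib
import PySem

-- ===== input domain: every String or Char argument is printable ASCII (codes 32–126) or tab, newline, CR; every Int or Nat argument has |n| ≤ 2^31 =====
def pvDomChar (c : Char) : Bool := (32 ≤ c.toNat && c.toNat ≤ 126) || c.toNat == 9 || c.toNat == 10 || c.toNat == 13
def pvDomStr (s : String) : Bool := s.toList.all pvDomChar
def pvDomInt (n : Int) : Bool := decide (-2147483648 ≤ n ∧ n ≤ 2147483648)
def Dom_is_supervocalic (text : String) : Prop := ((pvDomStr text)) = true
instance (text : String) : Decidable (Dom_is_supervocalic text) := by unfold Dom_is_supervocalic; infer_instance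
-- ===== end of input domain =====

-- B replaces A's stateful seen-flags dict (with early exit) by a stateless count-then-check
-- (str.count per vowel == 1); objective: idiomatic, same return value.

-- ===== PORT A =====
-- the for-loop over text with the mutable vowel-flag dict; early 'return False' = the 'false' branch
def isSupervocalicLoop : List Char → PySem.Dict Char Bool → Bool
  | [], vowels => vowels.values.all (fun b => b)
  | c :: cs, vowels =>
    if vowels.contains c then
      if vowels.getD c false then false
      else isSupervocalicLoop cs (vowels.insert c true)
    else isSupervocalicLoop cs vowels

def is_supervocalic (text : String) : Bool :=
  isSupervocalicLoop text.toList
    (PySem.Dict.ofList [('a', false), ('e', false), ('i', false), ('o', false), ('u', false)])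

-- ===== PORT B =====
def is_supervocalic_alt (text : String) : Bool :=
  "aeiou".toList.all (fun v => PySem.Str.count text (String.ofList [v]) == 1)

-- ===== PRECONDITION & SPEC =====
def Spec_is_supervocalic (text : String) (out : Bool) : Prop := out = is_supervocalic_alt text
instance (text : String) (out : Bool) : Decidable (Spec_is_supervocalic text out) := by unfold Spec_is_supervocalic; infer_instance

-- ===== CLAIM (what is proved, stated in full; the proofs are below) =====
def Claim_equal_is_supervocalic : Prop := ∀ (text : String), Dom_is_supervocalic text → Spec_is_supervocalic text (is_supervocalic text)

-- ===== LEMMAS AND PROOFS =====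

-- the five vowels, and the A-side dict holding flag f v at each vowel v
def pvVowels : List Char := ['a', 'e', 'i', 'o', 'u']

def pvMkd (f : Char → Bool) : PySem.Dict Char Bool :=
  PySem.Dict.mk (pvVowels.map (fun v => (v, f v)))

lemma pv_items_mkd (f : Char → Bool) : (pvMkd f).items = pvVowels.map (fun v => (v, f v)) := rfl

lemma pv_keys_mkd (f : Char → Bool) : (pvMkd f).keys = pvVowels := by
  simp [PySem.Dict.keys, pv_items_mkd, List.map_map, Function.comp_def]

lemma pv_nodup_vowels : pvVowels.Nodup := by decide

lemma pv_contains_mkd (f : Char → Bool) (c : Char) :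
    (pvMkd f).contains c = decide (c ∈ pvVowels) := by
  rw [PySem.Dict.contains_eq_decide_mem_keys, pv_keys_mkd]

lemma pv_getD_mkd (f : Char → Bool) (c : Char) (hc : c ∈ pvVowels) :
    (pvMkd f).getD c false = f c := by
  apply PySem.Dict.getD_of_mem_items
  · rw [pv_items_mkd]; exact List.mem_map.mpr ⟨c, hc, rfl⟩
  · rw [pv_keys_mkd]; exact pv_nodup_vowels

lemma pv_insert_mkd (f : Char → Bool) (c : Char) (hc : c ∈ pvVowels) :
    (pvMkd f).insert c true = pvMkd (fun v => if v = c then true else f v) := by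
  apply PySem.Dict.ext
  rw [PySem.Dict.items_insert_of_contains (pvMkd f) true (by rw [pv_contains_mkd]; simpa),
    pv_items_mkd, pv_items_mkd, List.map_map]
  apply List.map_congr_left
  intro v _
  by_cases h : v = c <;> simp [h]

lemma pv_all_congr (l : List Char) (p q : Char → Bool) (h : ∀ x ∈ l, p x = q x) :
    l.all p = l.all q := by
  induction l with
  | nil => rfl
  | cons a t ih => simp only [List.all_cons, h a (by simp), ih (fun x hx => h x (by simp [hx]))]

lemma pv_all_false (l : List Char) (p : Char → Bool) (c : Char) (h : c ∈ l) (h2 : p c = false) :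
    l.all p = false := by
  simp only [List.all_eq_false]; exact ⟨c, h, by simp [h2]⟩

-- the loop invariant: with flags f, A's loop answers "each vowel occurs exactly once, counting seen flags"
lemma pv_loopA (cs : List Char) : ∀ f : Char → Bool,
    isSupervocalicLoop cs (pvMkd f)
      = pvVowels.all (fun v => decide (cs.count v + (if f v then 1 else 0) = 1)) := by
  induction cs with
  | nil =>
    intro f
    show (pvMkd f).values.all (fun b => b) = _
    have hv : (pvMkd f).values = pvVowels.map f := by
      simp [PySem.Dict.values, pv_items_mkd, List.map_map, Function.comp]
    rw [hv, List.all_map]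
    apply pv_all_congr
    intro v _
    by_cases h : f v <;> simp [h, Function.comp]
  | cons c cs ih =>
    intro f
    show (if (pvMkd f).contains c then _ else _) = _
    rw [pv_contains_mkd]
    by_cases hc : c ∈ pvVowels
    · simp only [hc, decide_true, if_true]
      rw [pv_getD_mkd f c hc]
      by_cases hf : f c
      · rw [hf]
        simp only [if_true]
        symm
        apply pv_all_false _ _ c hc
        simp [hf]
      · rw [eq_false_of_ne_true hf]
        simp only [Bool.false_eq_true, if_false]
        rw [pv_insert_mkd f c hc, ih]
        apply pv_all_congr
        intro v _
        by_cases h : v = c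
        · simp [h, hf]
        · have h' : (c == v) = false := by simpa using fun hh : c = v => h hh.symm
          simp [List.count_cons, h', h]
    · simp only [hc, decide_false, Bool.false_eq_true, if_false]
      rw [ih]
      apply pv_all_congr
      intro v hv
      have h' : (c == v) = false := by
        simpa using fun hh : c = v => hc (hh ▸ hv)
      simp [List.count_cons, h']

-- Python's str.count with a single-character needle is the character count
lemma pv_countgo_singleton (v : Char) (l : List Char) : ∀ (fuel acc : Nat), l.length ≤ fuel →
    PySem.Chars.count.go [v] fuel l acc = acc + l.count v := by
  induction l with
  | nil => intro fuel acc _; cases fuel <;> simp [PySem.Chars.count.go]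
  | cons h t ih =>
    intro fuel acc hfuel
    cases fuel with
    | zero => simp at hfuel
    | succ n =>
      rw [PySem.Chars.count.go]
      by_cases he : v = h
      · subst he
        rw [if_pos (by simp [List.isPrefixOf])]
        show PySem.Chars.count.go [v] n t (acc + 1) = _
        rw [ih n (acc + 1) (by simpa using hfuel)]
        simp
        omega
      · have hb : (v == h) = false := by simpa using he
        rw [if_neg (by simp [List.isPrefixOf, hb])]
        rw [ih n acc (by simpa using hfuel)]
        have hb' : (h == v) = false := by simpa using fun hh : h = v => he hh.symm
        simp [List.count_cons, hb']

lemma pv_count_singleton (cs : List Char) (v : Char) :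
    PySem.Chars.count cs [v] = cs.count v := by
  rw [PySem.Chars.count]
  simp only [List.isEmpty_cons, Bool.false_eq_true, if_false]
  simpa using pv_countgo_singleton v cs cs.length 0 le_rfl

lemma pv_alt_eq (text : String) :
    is_supervocalic_alt text = pvVowels.all (fun v => decide (text.toList.count v = 1)) := by
  rw [is_supervocalic_alt]
  have : ("aeiou" : String).toList = pvVowels := by decide
  rw [this]
  apply pv_all_congr
  intro v _
  rw [PySem.Str.count_eq]
  have hm : (String.ofList [v]).toList = [v] := by simp
  rw [hm, pv_count_singleton]
  exact Bool.beq_eq_decide_eq _ _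

lemma pv_ofList_eq : (PySem.Dict.ofList [('a', false), ('e', false), ('i', false), ('o', false), ('u', false)] : PySem.Dict Char Bool) = pvMkd (fun _ => false) := by
  decide

-- ===== VERDICT (by name: the statement is the Claim_ definition above) =====
theorem is_supervocalic_spec : Claim_equal_is_supervocalic := by
  intro text _
  show is_supervocalic text = is_supervocalic_alt text
  rw [is_supervocalic, pv_ofList_eq, pv_loopA, pv_alt_eq]
  apply pv_all_congr
  intro v _
  simp
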